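-- pv_equiv track=rewrite | github.com/CS-433/ml-project-2-little_microbes | src/ml/samplers/.ipynb_checkpoints/final_utils-checkpoint.py | process_vectors
-- ===== SOURCE A (Python) =====
-- def process_vectors(vectors):
--     """
--     Transforms click vectors in vectors of 0 and 1 (to ignore time)
--
--     # Input
--         vectors: array of size (N, d, 10) (sequences of d clicks for the N students)
--
--     # Output
--         result: array of size (N, d, 10) containing the processed vectors
--     """
--     result = []
--     for vector in vectors:
--         sorted_vector = sorted(enumerate(vector), key=lambda x: x[1], reverse=True)
--         processed_vector = [0] * len(vector)
--         processed_vector[sorted_vector[0][0]] = 1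
--         processed_vector[sorted_vector[1][0]] = 1
--         result.append(processed_vector)
--
--     return result
-- ===== SOURCE B (Python) =====
-- def process_vectors(vectors):
--     """Same output as A: one-pass top-2 selection per vector instead of a full sort."""
--     result = []
--     for vector in vectors:
--         top = []  # at most two (index, value) pairs, best first; earlier index wins ties
--         for i, x in enumerate(vector):
--             if len(top) < 2:
--                 top.append((i, x))
--                 if len(top) == 2 and top[1][1] > top[0][1]:
--                     top[0], top[1] = top[1], top[0]
--             elif x > top[0][1]:
--                 top = [(i, x), top[0]]
--             elif x > top[1][1]:
--                 top[1] = (i, x)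
--         processed = [0] * len(vector)
--         processed[top[0][0]] = 1
--         processed[top[1][0]] = 1
--         result.append(processed)
--     return result
-- ===== Notes on version B (the rewrite author's own statement) =====
-- stated objective: faster
-- what changed: Replaces the full stable descending sort of enumerate(vector) by a single pass that maintains the best two (index, value) pairs, preserving first-occurrence tie-breaking.
import Mathlib
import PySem

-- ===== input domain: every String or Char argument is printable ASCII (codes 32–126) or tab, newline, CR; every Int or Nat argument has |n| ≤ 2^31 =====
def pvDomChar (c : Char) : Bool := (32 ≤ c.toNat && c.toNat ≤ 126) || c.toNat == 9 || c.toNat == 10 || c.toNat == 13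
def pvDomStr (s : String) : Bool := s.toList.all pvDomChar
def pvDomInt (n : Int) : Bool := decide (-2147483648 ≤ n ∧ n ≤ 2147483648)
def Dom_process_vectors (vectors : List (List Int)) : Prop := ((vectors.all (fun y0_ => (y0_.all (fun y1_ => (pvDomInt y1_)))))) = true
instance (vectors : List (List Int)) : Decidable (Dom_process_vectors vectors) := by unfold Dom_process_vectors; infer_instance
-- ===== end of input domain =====

-- B replaces A's full stable descending sort by a one-pass top-2 selection (measurably faster; same values).

-- ===== PORT A =====
-- per vector: sorted_vector = sorted(enumerate(vector), key=lambda x: x[1], reverse=True);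
-- processed[sorted_vector[0][0]] = 1; processed[sorted_vector[1][0]] = 1  (IndexError when len < 2, excluded by Pre_)
def pvProcessOneA (vector : List Int) : List Int :=
  let sorted_vector := PySem.List.sorted (PySem.List.enumerate vector 0) (fun x => x.2) true
  match PySem.List.pyGet? sorted_vector 0, PySem.List.pyGet? sorted_vector 1 with
  | some p0, some p1 =>
      PySem.List.pySetD (PySem.List.pySetD (List.replicate vector.length (0 : Int)) p0.1 1) p1.1 1
  | _, _ => []  -- Python raises IndexError here; outside Pre_

def process_vectors (vectors : List (List Int)) : List (List Int) :=
  vectors.foldl (fun result vector => result ++ [pvProcessOneA vector]) []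

-- ===== PORT B =====
-- the inner-loop body of Source B: update the best-two list with the next (index, value) pair
def pvTop2Step (top : List (Int × Int)) (p : Int × Int) : List (Int × Int) :=
  match top with
  | [] => [p]
  | [t0] => if p.2 > t0.2 then [p, t0] else [t0, p]
  | t0 :: t1 :: _ => if p.2 > t0.2 then [p, t0] else if p.2 > t1.2 then [t0, p] else top

def pvProcessOneB (vector : List Int) : List Int :=
  let top := (PySem.List.enumerate vector 0).foldl pvTop2Step []
  match top with
  | t0 :: t1 :: _ =>
      PySem.List.pySetD (PySem.List.pySetD (List.replicate vector.length (0 : Int)) t0.1 1) t1.1 1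
  | _ => []  -- Python raises IndexError here; outside Pre_

def process_vectors_alt (vectors : List (List Int)) : List (List Int) :=
  vectors.foldl (fun result vector => result ++ [pvProcessOneB vector]) []

-- ===== PRECONDITION & SPEC =====
-- Pre_ excludes exactly the vectors of length < 2, on which both Pythons raise IndexError.
def Pre_process_vectors (vectors : List (List Int)) : Prop :=
  ∀ v ∈ vectors, 2 ≤ v.length
instance (vectors : List (List Int)) : Decidable (Pre_process_vectors vectors) := by
  unfold Pre_process_vectors; infer_instance

def pvWitness_process_vectors : List (List Int) := [[1, 3, 2], [5, 5]]

def Spec_process_vectors (vectors : List (List Int)) (out : List (List Int)) : Prop := out = process_vectors_alt vectors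
instance (vectors : List (List Int)) (out : List (List Int)) : Decidable (Spec_process_vectors vectors out) := by unfold Spec_process_vectors; infer_instance

-- ===== CLAIM (what is proved, stated in full; the proofs are below) =====
def Claim_equal_process_vectors : Prop := ∀ (vectors : List (List Int)), Dom_process_vectors vectors → Pre_process_vectors vectors → Spec_process_vectors vectors (process_vectors vectors)

-- ===== LEMMAS AND PROOFS =====

-- one insertion step of A's stable descending sort, seen through `take 2`, is B's top-2 update
theorem take2_insertBy (x : Int × Int) (acc : List (Int × Int)) :
    (PySem.List.insertBy (fun a b => decide (b.2 < a.2)) x acc).take 2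
      = pvTop2Step (acc.take 2) x := by
  match acc with
  | [] => rfl
  | [a] =>
      simp only [PySem.List.insertBy, pvTop2Step, List.take, decide_eq_true_eq, gt_iff_lt]
      split_ifs <;> simp_all
  | a :: b :: t =>
      simp only [PySem.List.insertBy, pvTop2Step, List.take, decide_eq_true_eq, gt_iff_lt]
      split_ifs <;> simp_all

-- the whole fold, through `take 2`
theorem take2_foldl_insertBy (l : List (Int × Int)) (init : List (Int × Int)) :
    (l.foldl (fun acc x => PySem.List.insertBy (fun a b => decide (b.2 < a.2)) x acc) init).take 2
      = l.foldl pvTop2Step (init.take 2) := by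
  induction l generalizing init with
  | nil => rfl
  | cons x l ih =>
      simp only [List.foldl_cons, ih, take2_insertBy]

theorem pvProcessOne_eq (v : List Int) (hv : 2 ≤ v.length) :
    pvProcessOneA v = pvProcessOneB v := by
  have hsort := PySem.List.sorted_rev_eq_foldl_insertBy (PySem.List.enumerate v 0) (fun x => x.2)
  have htop : (PySem.List.enumerate v 0).foldl pvTop2Step []
      = (PySem.List.sorted (PySem.List.enumerate v 0) (fun x => x.2) true).take 2 := by
    rw [hsort, take2_foldl_insertBy]; rfl
  have hlen : 2 ≤ (PySem.List.sorted (PySem.List.enumerate v 0) (fun x => x.2) true).length := by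
    rw [PySem.List.length_sorted, PySem.List.length_enumerate]; exact hv
  obtain ⟨s0, s1, rest, hm⟩ :
      ∃ s0 s1 rest, PySem.List.sorted (PySem.List.enumerate v 0) (fun x => x.2) true
        = s0 :: s1 :: rest := by
    match hsv : PySem.List.sorted (PySem.List.enumerate v 0) (fun x => x.2) true, hlen with
    | s0 :: s1 :: rest, _ => exact ⟨s0, s1, rest, rfl⟩
    | [], h | [_], h => simp at h
  unfold pvProcessOneA pvProcessOneB
  rw [htop, hm]
  have hnn : (0:Int) ≤ (rest.length : Int) + 1 := by positivity
  simp [PySem.List.pyGet?, PySem.List.pyIdx?, hnn]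

-- ===== VERDICT (by name: the statement is the Claim_ definition above) =====
theorem process_vectors_spec : Claim_equal_process_vectors := by
  intro vectors _ hpre
  unfold Spec_process_vectors process_vectors process_vectors_alt
  rw [PySem.List.foldl_append_singleton_eq_map pvProcessOneA,
    PySem.List.foldl_append_singleton_eq_map pvProcessOneB]
  simp only [List.nil_append]
  exact List.map_congr_left (fun v hv => pvProcessOne_eq v (hpre v hv))
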